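-- pv_equiv track=rewrite | github.com/lemonade-sdk/lemonade-eval | scripts/lemonade_dashboard_integration.py | _determine_run_type
-- ===== SOURCE A (Python) =====
-- from typing import Any, Dict, List, Optional
--
-- def _determine_run_type(yaml_data: Dict[str, Any]) -> str:
--     """Determine run type from YAML data."""
--     if any(k.startswith("mmlu_") for k in yaml_data.keys()):
--         return "accuracy-mmlu"
--     elif any(k.startswith("humaneval_") for k in yaml_data.keys()):
--         return "accuracy-humaneval"
--     elif any(k.startswith("lm_eval_") for k in yaml_data.keys()):
--         return "lm-eval"
--     elif "perplexity" in yaml_data: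
--         return "perplexity"
--     else:
--         return "benchmark"
-- ===== SOURCE B (Python) =====
-- def _determine_run_type(yaml_data):
--     """Determine run type from YAML data (single pass over the keys)."""
--     has_humaneval = False
--     has_lm_eval = False
--     for k in yaml_data.keys():
--         if k.startswith("mmlu_"):
--             return "accuracy-mmlu"
--         if k.startswith("humaneval_"):
--             has_humaneval = True
--         elif k.startswith("lm_eval_"):
--             has_lm_eval = True
--     if has_humaneval:
--         return "accuracy-humaneval"
--     if has_lm_eval:
--         return "lm-eval"
--     if "perplexity" in yaml_data:
--         return "perplexity"
--     return "benchmark"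
-- ===== Notes on version B (the rewrite author's own statement) =====
-- stated objective: alternative
-- what changed: Replaces A's four separate scans of the keys (one any() per category plus a membership test) with a single loop that returns immediately on the first mmlu_ key and otherwise collects humaneval/lm_eval flags, deciding by priority after the loop.
import Mathlib
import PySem

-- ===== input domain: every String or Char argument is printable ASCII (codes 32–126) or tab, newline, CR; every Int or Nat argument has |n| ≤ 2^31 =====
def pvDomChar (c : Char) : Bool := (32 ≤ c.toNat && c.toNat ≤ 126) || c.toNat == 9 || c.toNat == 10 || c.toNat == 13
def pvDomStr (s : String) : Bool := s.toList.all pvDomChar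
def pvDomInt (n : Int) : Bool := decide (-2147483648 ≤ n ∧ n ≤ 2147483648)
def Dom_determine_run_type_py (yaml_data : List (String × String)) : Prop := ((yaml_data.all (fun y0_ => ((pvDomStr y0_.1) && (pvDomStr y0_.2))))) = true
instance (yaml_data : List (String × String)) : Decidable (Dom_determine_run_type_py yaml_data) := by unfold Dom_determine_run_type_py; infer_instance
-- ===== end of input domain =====

-- B replaces A's four separate key scans with one flag-collecting pass (alternative decomposition, same cost).


-- ===== PORT A =====
def determine_run_type_py (yaml_data : List (String × String)) : String :=
  if yaml_data.any (fun kv => PySem.Str.startswith kv.1 "mmlu_") then "accuracy-mmlu"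
  else if yaml_data.any (fun kv => PySem.Str.startswith kv.1 "humaneval_") then "accuracy-humaneval"
  else if yaml_data.any (fun kv => PySem.Str.startswith kv.1 "lm_eval_") then "lm-eval"
  else if yaml_data.any (fun kv => kv.1 == "perplexity") then "perplexity"
  else "benchmark"

-- ===== PORT B =====
-- single pass: early return on mmlu_, flags for humaneval_/lm_eval_, priority decision after the loop
def drtLoop (yaml_data : List (String × String)) : List (String × String) → Bool → Bool → String
  | [], hasH, hasL =>
      if hasH then "accuracy-humaneval"
      else if hasL then "lm-eval"
      else if yaml_data.any (fun kv => kv.1 == "perplexity") then "perplexity"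
      else "benchmark"
  | kv :: rest, hasH, hasL =>
      if PySem.Str.startswith kv.1 "mmlu_" then "accuracy-mmlu"
      else if PySem.Str.startswith kv.1 "humaneval_" then drtLoop yaml_data rest true hasL
      else if PySem.Str.startswith kv.1 "lm_eval_" then drtLoop yaml_data rest hasH true
      else drtLoop yaml_data rest hasH hasL

def determine_run_type_py_alt (yaml_data : List (String × String)) : String :=
  drtLoop yaml_data yaml_data false false

-- ===== PRECONDITION & SPEC =====
def Spec_determine_run_type_py (yaml_data : List (String × String)) (out : String) : Prop := out = determine_run_type_py_alt yaml_data
instance (yaml_data : List (String × String)) (out : String) : Decidable (Spec_determine_run_type_py yaml_data out) := by unfold Spec_determine_run_type_py; infer_instance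

-- ===== CLAIM (what is proved, stated in full; the proofs are below) =====
def Claim_equal_determine_run_type_py : Prop := ∀ (yaml_data : List (String × String)), Dom_determine_run_type_py yaml_data → Spec_determine_run_type_py yaml_data (determine_run_type_py yaml_data)

-- ===== LEMMAS AND PROOFS =====

-- characterisation of the single-pass loop in terms of whole-list scans
theorem drtLoop_eq (yd : List (String × String)) (l : List (String × String)) (hasH hasL : Bool) :
    drtLoop yd l hasH hasL =
      if l.any (fun kv => PySem.Str.startswith kv.1 "mmlu_") then "accuracy-mmlu"
      else if hasH || l.any (fun kv => PySem.Str.startswith kv.1 "humaneval_") then "accuracy-humaneval"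
      else if hasL || l.any (fun kv => PySem.Str.startswith kv.1 "lm_eval_") then "lm-eval"
      else if yd.any (fun kv => kv.1 == "perplexity") then "perplexity"
      else "benchmark" := by
  induction l generalizing hasH hasL with
  | nil => simp [drtLoop]
  | cons kv rest ih =>
      simp only [drtLoop, List.any_cons]
      by_cases hm : PySem.Chars.startswith kv.1.toList ['m','m','l','u','_'] = true
      · simp [hm]
      · rw [Bool.not_eq_true] at hm
        by_cases hh : PySem.Chars.startswith kv.1.toList ['h','u','m','a','n','e','v','a','l','_'] = true
        · simp [hh, ih]
          simp only [hm, Bool.false_or]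
          simp
        · rw [Bool.not_eq_true] at hh
          by_cases hl : PySem.Chars.startswith kv.1.toList ['l','m','_','e','v','a','l','_'] = true
          · simp [hh, hl, ih]
            simp only [hm, hh, Bool.false_or]
            rfl
          · rw [Bool.not_eq_true] at hl
            simp [hh, hl, ih]
            simp only [hm, hh, hl, Bool.false_or]
            rfl

-- ===== VERDICT (by name: the statement is the Claim_ definition above) =====
theorem determine_run_type_py_spec : Claim_equal_determine_run_type_py := by
  intro yaml_data _
  unfold Spec_determine_run_type_py determine_run_type_py determine_run_type_py_alt
  rw [drtLoop_eq]
  simp only [Bool.false_or]
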